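-- pv_equiv track=rewrite | github.com/acorrenson/miniDna | src/miniDna.py | dotPlot
-- ===== SOURCE A (Python) =====
-- def dotPlot(seqA: str, seqB: str) -> list:
--   """Compare two DNA sequences using DotPlot method.
--
--     **Keyword arguments:**
--     seqA -- first sequence
--     seqB -- second sequence
--   """
--
--   la = len(seqA)
--   lb = len(seqB)
--   M = [[' ' for n in range(la)] for m in range(lb)]
--   for i in range(lb):
--     for j in range(la):
--       if seqB[i] == seqA[j]:
--         M[i][j] = 'x'
--   return M
-- ===== SOURCE B (Python) =====
-- def dotPlot(seqA: str, seqB: str) -> list: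
--   """Compare two DNA sequences using DotPlot method (index-driven placement)."""
--   index = {}
--   for j, c in enumerate(seqA):
--     index.setdefault(c, []).append(j)
--   M = []
--   for ch in seqB:
--     row = [' '] * len(seqA)
--     for j in index.get(ch, []):
--       row[j] = 'x'
--     M.append(row)
--   return M
-- ===== Notes on version B (the rewrite author's own statement) =====
-- stated objective: alternative
-- what changed: Replaces the per-cell equality test over a pre-built lb x la matrix with a one-pass character-position index of seqA, then builds each row by placing 'x' only at the indexed matching columns.
import Mathlib
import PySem

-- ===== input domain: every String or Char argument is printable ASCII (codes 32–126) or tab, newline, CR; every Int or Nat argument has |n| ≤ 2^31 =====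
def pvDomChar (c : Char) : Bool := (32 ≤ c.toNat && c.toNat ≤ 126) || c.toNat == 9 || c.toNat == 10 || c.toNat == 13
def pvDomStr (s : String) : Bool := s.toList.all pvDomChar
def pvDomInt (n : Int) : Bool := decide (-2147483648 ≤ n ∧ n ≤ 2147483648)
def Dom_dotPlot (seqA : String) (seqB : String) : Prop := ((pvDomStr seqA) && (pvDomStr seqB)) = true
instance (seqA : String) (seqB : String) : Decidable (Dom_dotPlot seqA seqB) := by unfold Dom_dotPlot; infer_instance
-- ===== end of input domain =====

-- B builds a character→columns index of seqA once, then writes 'x' only at indexed columns of each fresh row (alternative decomposition; same asymptotic cost).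

-- ===== PORT A =====
def dotPlot (seqA : String) (seqB : String) : List (List String) :=
  let la : Int := PySem.Str.len seqA
  let lb : Int := PySem.Str.len seqB
  let M : List (List String) :=
    (PySem.List.pyRange 0 lb 1).map (fun _ => (PySem.List.pyRange 0 la 1).map (fun _ => " "))
  (PySem.List.pyRange 0 lb 1).foldl (fun M i =>
    (PySem.List.pyRange 0 la 1).foldl (fun M j =>
      if PySem.Str.pyGet? seqB i = PySem.Str.pyGet? seqA j then
        PySem.List.pySetD M i (PySem.List.pySetD (PySem.List.pyGetD M i []) j "x")
      else M) M) M

-- ===== PORT B =====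
def dotPlot_alt (seqA : String) (seqB : String) : List (List String) :=
  let index : PySem.Dict Char (List Int) :=
    (PySem.List.enumerate seqA.toList 0).foldl
      (fun d p => d.modify p.2 [] (· ++ [p.1])) PySem.Dict.empty
  seqB.toList.foldl (fun M ch =>
    let row := List.replicate seqA.toList.length " "
    let row := (index.getD ch []).foldl (fun r j => PySem.List.pySetD r j "x") row
    M ++ [row]) []

-- ===== PRECONDITION & SPEC =====
def Spec_dotPlot (seqA : String) (seqB : String) (out : List (List String)) : Prop := out = dotPlot_alt seqA seqB
instance (seqA : String) (seqB : String) (out : List (List String)) : Decidable (Spec_dotPlot seqA seqB out) := by unfold Spec_dotPlot; infer_instance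

-- ===== CLAIM (what is proved, stated in full; the proofs are below) =====
def Claim_equal_dotPlot : Prop := ∀ (seqA : String) (seqB : String), Dom_dotPlot seqA seqB → Spec_dotPlot seqA seqB (dotPlot seqA seqB)

-- ===== LEMMAS AND PROOFS =====

-- the common value both ports equal
def pvCanon (a b : List Char) : List (List String) :=
  b.map (fun ch => a.map (fun c => if ch = c then "x" else " "))

-- entry characterization of a fold placing "x" at (nonnegative) positions
theorem pvSetFold (L : List Int) (r0 : List String) (hL : ∀ j ∈ L, 0 ≤ j) (m : Nat) :
    (L.foldl (fun r j => PySem.List.pySetD r j "x") r0)[m]? =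
      if (m : Int) ∈ L ∧ m < r0.length then some "x" else r0[m]? := by
  induction L generalizing r0 with
  | nil => simp
  | cons j L ih =>
    have hj : 0 ≤ j := hL j (by simp)
    have hL' : ∀ x ∈ L, 0 ≤ x := fun x hx => hL x (by simp [hx])
    simp only [List.foldl_cons]
    rw [PySem.List.pySetD_of_nonneg r0 "x" hj, ih _ hL']
    by_cases hlen : m < r0.length
    · by_cases hmL : (m : Int) ∈ L
      · simp [hmL, hlen, List.length_set]
      · simp only [List.length_set, hmL, false_and, if_false, List.mem_cons, or_false]
        by_cases hmj : (m : Int) = j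
        · have hjm : j.toNat = m := by omega
          rw [hjm, List.getElem?_set_self', List.getElem?_eq_getElem hlen]
          simp [hmj, hlen]
        · have hjm : j.toNat ≠ m := by omega
          rw [List.getElem?_set_ne hjm]
          simp [hmj]
    · have h1 : r0[m]? = none := List.getElem?_eq_none (by omega)
      have h2 : (r0.set j.toNat "x")[m]? = none :=
        List.getElem?_eq_none (by rw [List.length_set]; omega)
      simp [List.length_set, hlen, h1, h2]

-- the index dict lists exactly the columns of c in a, in order
theorem pvIndexGetD (a : List Char) (c : Char) :
    (((PySem.List.enumerate a 0).foldl
        (fun d p => d.modify p.2 [] (· ++ [p.1])) PySem.Dict.empty).getD c [])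
      = ((PySem.List.enumerate a 0).filter (fun p => p.2 == c)).map (·.1) := by
  have h := PySem.Dict.getD_foldl_modify_append
      ((PySem.List.enumerate a 0).map (fun p => (p.2, p.1)))
      (PySem.Dict.empty : PySem.Dict Char (List Int)) c
  rw [List.foldl_map] at h
  simpa [List.filter_map, List.map_map, Function.comp] using h

-- a row equals the canonical row when the position list is exactly the matching columns
theorem pvRowEq (a : List Char) (ch : Char) (L : List Int)
    (hL : ∀ j ∈ L, 0 ≤ j)
    (hmem : ∀ m : Nat, ((m : Int) ∈ L ↔ m < a.length ∧ a[m]? = some ch)) :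
    L.foldl (fun r j => PySem.List.pySetD r j "x") (List.replicate a.length " ")
      = a.map (fun c => if ch = c then "x" else " ") := by
  apply List.ext_getElem?
  intro m
  rw [pvSetFold L _ hL m]
  simp only [List.length_replicate]
  by_cases hlen : m < a.length
  · have ha : a[m]? = some a[m] := List.getElem?_eq_getElem hlen
    by_cases hx : a[m] = ch
    · have hmm : (m : Int) ∈ L := by rw [hmem m]; exact ⟨hlen, by rw [ha, hx]⟩
      simp [hmm, hlen, ha, hx.symm]
    · have hmm : ¬ (m : Int) ∈ L := by
        rw [hmem m]; rintro ⟨-, h⟩; rw [ha] at h; exact hx (Option.some.inj h)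
      have hch : ¬ ch = a[m] := fun h => hx h.symm
      simp [hmm, hlen, ha, List.getElem?_replicate, hch]
  · have hmm : ¬ (m : Int) ∈ L := by rw [hmem m]; rintro ⟨h, -⟩; exact hlen h
    simp [hmm, hlen, List.getElem?_replicate,
      List.getElem?_eq_none (le_of_not_gt hlen)]

theorem pvAlt_eq_canon (sa sb : String) : dotPlot_alt sa sb = pvCanon sa.toList sb.toList := by
  unfold dotPlot_alt pvCanon
  rw [PySem.List.foldl_append_singleton_eq_map, List.nil_append]
  apply List.map_congr_left
  intro ch _
  apply pvRowEq
  · intro j hj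
    rw [pvIndexGetD] at hj
    rcases List.mem_map.1 hj with ⟨p, hp, rfl⟩
    rcases (PySem.List.mem_enumerate_iff _ _ _).1 (List.mem_filter.1 hp).1 with ⟨k, hk, rfl⟩
    simp
  · intro m
    rw [pvIndexGetD]
    constructor
    · intro hm
      rcases List.mem_map.1 hm with ⟨p, hp, hp1⟩
      rcases List.mem_filter.1 hp with ⟨hpe, hpc⟩
      rcases (PySem.List.mem_enumerate_iff _ _ _).1 hpe with ⟨k, hk, rfl⟩
      simp only [zero_add] at hp1
      have hkm : k = m := by exact_mod_cast hp1
      subst hkm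
      refine ⟨hk, ?_⟩
      simp only [beq_iff_eq] at hpc
      rw [List.getElem?_eq_getElem hk]
      simpa using hpc
    · rintro ⟨hm, hc⟩
      apply List.mem_map.2
      refine ⟨((m : Int), sa.toList[m]), ?_, rfl⟩
      apply List.mem_filter.2
      have hca : sa.toList[m] = ch := by
        rw [List.getElem?_eq_getElem hm] at hc; exact Option.some.inj hc
      refine ⟨?_, by simp [hca]⟩
      exact (PySem.List.mem_enumerate_iff _ _ _).2 ⟨m, hm, by simp⟩

-- inner loop of A only touches row i
theorem pvInnerDecomp (J : List Int) (M : List (List String)) (i : Int) (hi : 0 ≤ i)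
    (P : Int → Prop) [DecidablePred P] :
    J.foldl (fun M j => if P j then
        PySem.List.pySetD M i (PySem.List.pySetD (PySem.List.pyGetD M i []) j "x")
      else M) M
    = PySem.List.pySetD M i
        (J.foldl (fun r j => if P j then PySem.List.pySetD r j "x" else r)
          (PySem.List.pyGetD M i [])) := by
  induction J generalizing M with
  | nil =>
    simp only [List.foldl_nil]
    symm
    rw [PySem.List.pySetD_of_nonneg M _ hi]
    by_cases h : i.toNat < M.length
    · rw [PySem.List.pyGetD_eq_getElem M [] hi (by omega), List.set_getElem_self]
    · exact List.set_eq_of_length_le (le_of_not_gt h)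
  | cons j J ih =>
    simp only [List.foldl_cons]
    by_cases hP : P j
    · simp only [hP, if_true]
      rw [ih]
      by_cases h : i.toNat < M.length
      · have hget : PySem.List.pyGetD (PySem.List.pySetD M i
            (PySem.List.pySetD (PySem.List.pyGetD M i []) j "x")) i []
            = PySem.List.pySetD (PySem.List.pyGetD M i []) j "x" := by
          rw [PySem.List.pySetD_of_nonneg M _ hi,
            PySem.List.pyGetD_eq_getElem _ [] hi (by rw [List.length_set]; omega)]
          apply Option.some.inj
          rw [← List.getElem?_eq_getElem (by rw [List.length_set]; omega),
            List.getElem?_set_self', List.getElem?_eq_getElem h]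
          rfl
        rw [hget, PySem.List.pySetD_of_nonneg M _ hi, PySem.List.pySetD_of_nonneg M _ hi,
          PySem.List.pySetD_of_nonneg _ _ hi, List.set_set]
      · have hno : ∀ r : List String, PySem.List.pySetD M i r = M := by
          intro r
          rw [PySem.List.pySetD_of_nonneg M _ hi]
          exact List.set_eq_of_length_le (le_of_not_gt h)
        have hget0 : PySem.List.pyGetD M i [] = ([] : List String) := by
          apply PySem.List.pyGetD_of_none
          have hcast : i = ((i.toNat : Nat) : Int) := by omega
          rw [hcast, PySem.List.pyGet?_natCast]
          exact List.getElem?_eq_none (by omega)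
        have hj0 : PySem.List.pySetD ([] : List String) j "x" = [] :=
          List.length_eq_zero_iff.mp (by rw [PySem.List.length_pySetD]; rfl)
        simp only [hget0, hj0, hno]
    · simp only [hP, if_false]
      exact ih M

-- outer loop entry characterization: each index of L gets its row rewritten once
theorem pvOuter (f : Int → List String → List String) (L : List Int) (hnd : L.Nodup)
    (hpos : ∀ i ∈ L, 0 ≤ i) (M : List (List String)) (m : Nat) :
    (L.foldl (fun M i => PySem.List.pySetD M i (f i (PySem.List.pyGetD M i []))) M)[m]?
      = if (m : Int) ∈ L then (M[m]?).map (f m) else M[m]? := by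
  induction L generalizing M with
  | nil => simp
  | cons i L ih =>
    have hi : 0 ≤ i := hpos i (by simp)
    have hnd' := (List.nodup_cons.1 hnd)
    have hpos' : ∀ x ∈ L, 0 ≤ x := fun x hx => hpos x (by simp [hx])
    simp only [List.foldl_cons]
    rw [ih hnd'.2 hpos', PySem.List.pySetD_of_nonneg M _ hi]
    by_cases hmL : (m : Int) ∈ L
    · have hne : (m : Int) ≠ i := fun h => hnd'.1 (h ▸ hmL)
      have hne' : i.toNat ≠ m := by omega
      simp [hmL, List.getElem?_set_ne hne']
    · by_cases hmi : (m : Int) = i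
      · have him : i.toNat = m := by omega
        subst him
        by_cases hlen : i.toNat < M.length
        · have hget : PySem.List.pyGetD M i [] = M[i.toNat] :=
            PySem.List.pyGetD_eq_getElem M [] hi (by omega)
          rw [hget, if_neg hmL, List.getElem?_set_self', List.getElem?_eq_getElem hlen,
            if_pos (List.mem_cons.2 (Or.inl hmi)), hmi]
          simp [Function.const]
        · have h1 : (M.set i.toNat (f i (PySem.List.pyGetD M i [])))[i.toNat]? = none :=
            List.getElem?_eq_none (by rw [List.length_set]; omega)
          have h2 : M[i.toNat]? = none := List.getElem?_eq_none (by omega)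
          rw [if_neg hmL, h1, if_pos (List.mem_cons.2 (Or.inl hmi)), h2]
          rfl
      · have hne' : i.toNat ≠ m := by omega
        simp [hmL, hmi, List.getElem?_set_ne hne']

theorem pvA_eq_canon (sa sb : String) : dotPlot sa sb = pvCanon sa.toList sb.toList := by
  unfold dotPlot
  set a := sa.toList with ha
  set b := sb.toList with hb
  have hla : PySem.Str.len sa = (a.length : Int) := by rw [PySem.Str.len_eq]
  have hlb : PySem.Str.len sb = (b.length : Int) := by rw [PySem.Str.len_eq]
  have hM0 : (PySem.List.pyRange 0 (PySem.Str.len sb) 1).map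
      (fun _ => (PySem.List.pyRange 0 (PySem.Str.len sa) 1).map (fun _ => (" " : String)))
      = List.replicate b.length (List.replicate a.length " ") := by
    rw [List.map_const', List.map_const']
    rw [hla, hlb]
    simp [PySem.List.length_pyRange_one]
  simp only [hM0]
  have hbody : ∀ (M : List (List String)), ∀ i ∈ PySem.List.pyRange 0 (PySem.Str.len sb) 1,
      ((PySem.List.pyRange 0 (PySem.Str.len sa) 1).foldl (fun M j =>
        if PySem.Str.pyGet? sb i = PySem.Str.pyGet? sa j then
          PySem.List.pySetD M i (PySem.List.pySetD (PySem.List.pyGetD M i []) j "x")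
        else M) M)
      = PySem.List.pySetD M i
          ((PySem.List.pyRange 0 (PySem.Str.len sa) 1).foldl (fun r j =>
            if PySem.Str.pyGet? sb i = PySem.Str.pyGet? sa j then PySem.List.pySetD r j "x" else r)
            (PySem.List.pyGetD M i [])) := by
    intro M i hi
    have hi0 : 0 ≤ i := ((PySem.List.mem_pyRange_one).1 hi).1
    exact pvInnerDecomp _ M i hi0 _
  rw [PySem.List.foldl_congr_mem _ _ _ _ hbody]
  apply List.ext_getElem?
  intro m
  rw [pvOuter (fun i r => (PySem.List.pyRange 0 (PySem.Str.len sa) 1).foldl (fun r j =>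
      if PySem.Str.pyGet? sb i = PySem.Str.pyGet? sa j then PySem.List.pySetD r j "x" else r) r)
    _ (PySem.List.nodup_pyRange_one 0 (PySem.Str.len sb))
    (fun i hi => ((PySem.List.mem_pyRange_one).1 hi).1)]
  by_cases hm : m < b.length
  · have hmem : (m : Int) ∈ PySem.List.pyRange 0 (PySem.Str.len sb) 1 := by
      rw [PySem.List.mem_pyRange_one, hlb]
      exact ⟨by omega, by exact_mod_cast hm⟩
    rw [if_pos hmem, List.getElem?_replicate, if_pos hm]
    unfold pvCanon
    rw [List.getElem?_map, List.getElem?_eq_getElem hm]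
    simp only [Option.map_some]
    congr 1
    rw [PySem.List.foldl_ite_eq_foldl_filter]
    apply pvRowEq
    · intro j hj
      exact ((PySem.List.mem_pyRange_one).1 (List.mem_of_mem_filter hj)).1
    · intro m'
      rw [List.mem_filter, PySem.List.mem_pyRange_one, hla]
      have hgb : PySem.Str.pyGet? sb (m : Int) = some b[m] := by
        rw [PySem.Str.pyGet?_natCast, ← hb, List.getElem?_eq_getElem hm]
      constructor
      · rintro ⟨⟨-, h1⟩, h2⟩
        have hm'a : m' < a.length := by exact_mod_cast h1
        simp only [decide_eq_true_eq] at h2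
        rw [hgb, PySem.Str.pyGet?_natCast, ← ha, List.getElem?_eq_getElem hm'a] at h2
        exact ⟨hm'a, by rw [List.getElem?_eq_getElem hm'a, ← Option.some.inj h2]⟩
      · rintro ⟨h1, h2⟩
        refine ⟨⟨by omega, by exact_mod_cast h1⟩, ?_⟩
        rw [List.getElem?_eq_getElem h1] at h2
        simp only [decide_eq_true_eq]
        rw [hgb, PySem.Str.pyGet?_natCast, ← ha, List.getElem?_eq_getElem h1,
          Option.some.inj h2]
  · have hmem : ¬ (m : Int) ∈ PySem.List.pyRange 0 (PySem.Str.len sb) 1 := by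
      rw [PySem.List.mem_pyRange_one, hlb]
      rintro ⟨-, h⟩
      have : m < b.length := by exact_mod_cast h
      omega
    rw [if_neg hmem, List.getElem?_replicate, if_neg hm]
    unfold pvCanon
    rw [List.getElem?_map, List.getElem?_eq_none (le_of_not_gt hm)]
    rfl

-- ===== VERDICT (by name: the statement is the Claim_ definition above) =====
theorem dotPlot_spec : Claim_equal_dotPlot := by
  intro sa sb _
  unfold Spec_dotPlot
  rw [pvA_eq_canon, pvAlt_eq_canon]
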